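-- pv_equiv track=rewrite | github.com/abollaert/aoc2024 | d5.py | fix_rule
-- ===== SOURCE A (Python) =====
-- def fix_rule(update: list[int], rule: tuple[int, int]) -> list[int]:
--     index_a: int = update.index(rule[0])
--     index_b: int = update.index(rule[1])
--
--     new_update: list[int] = [0] * len(update)
--
--     for i in range(len(update)):
--         if i < index_b:
--             new_update[i] = update[i]
--         elif i > index_b and i <= index_a:
--             new_update[i - 1] = update[i]
--         elif i > index_a:
--             new_update[i] = update[i]
--
--         new_update[index_a] = update[index_b]
--
--     return new_update
-- ===== SOURCE B (Python) =====
-- def fix_rule(update: list[int], rule: tuple[int, int]) -> list[int]: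
--     a = update.index(rule[0])
--     b = update.index(rule[1])
--     new_update = list(update)
--     if b < a:
--         # shift the block between the two positions one step left
--         new_update[b:a] = update[b + 1:a + 1]
--     # place the moved element at the position of rule[0]
--     new_update[a] = update[b]
--     return new_update
-- ===== Notes on version B (the rewrite author's own statement) =====
-- stated objective: simpler
-- what changed: Replaces A's index-by-index loop with three branchy cases (and a redundant overwrite executed every iteration) by copying the list, doing one slice assignment to shift the block left when needed, and placing the moved element once.
import Mathlib
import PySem

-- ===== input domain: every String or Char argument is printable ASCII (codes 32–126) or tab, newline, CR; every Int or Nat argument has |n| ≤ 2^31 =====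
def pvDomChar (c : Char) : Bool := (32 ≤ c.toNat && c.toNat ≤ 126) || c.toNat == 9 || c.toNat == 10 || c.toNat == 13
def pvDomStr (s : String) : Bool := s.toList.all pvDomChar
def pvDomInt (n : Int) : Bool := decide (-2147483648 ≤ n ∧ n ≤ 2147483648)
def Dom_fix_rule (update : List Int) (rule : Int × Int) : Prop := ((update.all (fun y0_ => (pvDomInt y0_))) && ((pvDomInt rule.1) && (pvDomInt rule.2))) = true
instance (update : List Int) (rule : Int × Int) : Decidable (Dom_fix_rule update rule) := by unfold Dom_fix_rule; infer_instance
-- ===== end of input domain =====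

-- B replaces A's branchy per-index loop by a copy, one slice assignment and a single placement (simpler decomposition, same O(n) cost).

-- ===== PORT A =====
-- the body of A's for-loop (three branches writing one cell, then the unconditional overwrite of index_a)
def fixRuleStep (update : List Int) (index_a index_b : Nat) (new_update : List Int) (i : Nat) : List Int :=
  let new_update :=
    if i < index_b then new_update.set i (update.getD i 0)
    else if index_b < i ∧ i ≤ index_a then new_update.set (i - 1) (update.getD i 0)
    else if index_a < i then new_update.set i (update.getD i 0)
    else new_update
  new_update.set index_a (update.getD index_b 0)

def fix_rule (update : List Int) (rule : Int × Int) : List Int :=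
  match PySem.List.index? update rule.1, PySem.List.index? update rule.2 with
  | some index_a, some index_b =>
      (List.range update.length).foldl (fixRuleStep update index_a index_b)
        (List.replicate update.length 0)
  | _, _ => []   -- update.index raised ValueError: excluded by Pre_fix_rule

-- ===== PORT B =====
def fix_rule_alt (update : List Int) (rule : Int × Int) : List Int :=
  match PySem.List.index? update rule.1 with
  | none => []   -- update.index raised ValueError: excluded by Pre_fix_rule
  | some a =>
    match PySem.List.index? update rule.2 with
    | none => []   -- update.index raised ValueError: excluded by Pre_fix_rule
    | some b =>
      let new_update := update
      let new_update :=
        if b < a then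
          -- new_update[b:a] = update[b+1:a+1]
          new_update.take b ++ PySem.List.slice update (some ((b : Int) + 1)) (some ((a : Int) + 1)) ++ new_update.drop a
        else new_update
      new_update.set a (update.getD b 0)

-- ===== PRECONDITION & SPEC =====
-- Pre_ excludes exactly the inputs where update.index raises ValueError (a rule element absent from update).
def Pre_fix_rule (update : List Int) (rule : Int × Int) : Prop := rule.1 ∈ update ∧ rule.2 ∈ update
instance (update : List Int) (rule : Int × Int) : Decidable (Pre_fix_rule update rule) := by unfold Pre_fix_rule; infer_instance
def pvWitness_fix_rule : List Int × (Int × Int) := ([3, 1, 2], (2, 1))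

def Spec_fix_rule (update : List Int) (rule : Int × Int) (out : List Int) : Prop := out = fix_rule_alt update rule
instance (update : List Int) (rule : Int × Int) (out : List Int) : Decidable (Spec_fix_rule update rule out) := by unfold Spec_fix_rule; infer_instance

-- ===== CLAIM (what is proved, stated in full; the proofs are below) =====
def Claim_equal_fix_rule : Prop := ∀ (update : List Int) (rule : Int × Int), Dom_fix_rule update rule → Pre_fix_rule update rule → Spec_fix_rule update rule (fix_rule update rule)

-- ===== LEMMAS AND PROOFS =====

-- the value A's loop has written at position j after the first m iterations
def pvVal (update : List Int) (ia ib m j : Nat) : Int :=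
  if m = 0 then 0
  else if j = ia then update.getD ib 0
  else if j < ib ∨ ia < j then (if j < m then update.getD j 0 else 0)
  else if ib ≤ j ∧ j < ia then (if j + 1 < m then update.getD (j + 1) 0 else 0)
  else 0

theorem pvGetD_set (l : List Int) (i : Nat) (v : Int) (j : Nat) :
    (l.set i v).getD j 0 = if i = j ∧ j < l.length then v else l.getD j 0 := by
  simp only [List.getD_eq_getElem?_getD, List.getElem?_set]
  split_ifs with h1 h2 h3 h4 <;> simp_all

theorem pvEq_of_getD (l1 l2 : List Int) (h : l1.length = l2.length)
    (h2 : ∀ j, l1.getD j 0 = l2.getD j 0) : l1 = l2 := by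
  apply List.ext_getElem h
  intro i h1 h2'
  have := h2 i
  rwa [List.getD_eq_getElem _ _ h1, List.getD_eq_getElem _ _ h2'] at this

set_option maxHeartbeats 1000000 in
theorem fixRule_loop_char (update : List Int) (ia ib : Nat)
    (hia : ia < update.length) (hib : ib < update.length) :
    ∀ m, m ≤ update.length →
      ((List.range m).foldl (fixRuleStep update ia ib) (List.replicate update.length 0)).length = update.length ∧
      ∀ j, ((List.range m).foldl (fixRuleStep update ia ib) (List.replicate update.length 0)).getD j 0
            = if j < update.length then pvVal update ia ib m j else 0 := by
  intro m
  induction m with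
  | zero =>
      intro _
      constructor
      · simp
      · intro j
        simp [pvVal, List.getD_eq_getElem?_getD, List.getElem?_replicate]
        split_ifs <;> simp_all
  | succ m ih =>
      intro hm
      obtain ⟨hlen, hget⟩ := ih (by omega)
      rw [List.range_succ, List.foldl_append]
      simp only [List.foldl_cons, List.foldl_nil]
      generalize (List.range m).foldl (fixRuleStep update ia ib) (List.replicate update.length 0) = L at hlen hget ⊢
      constructor
      · unfold fixRuleStep
        split_ifs <;> simp [hlen]
      · intro j
        unfold fixRuleStep
        split_ifs with h1 h2 h3 <;>
          simp only [pvGetD_set, List.length_set, hlen, hget] <;>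
          (unfold pvVal; split_ifs <;> first | rfl | omega | (congr 1; omega) | (exfalso; assumption))
  
theorem fixRuleAlt_char (update : List Int) (a b : Nat)
    (ha : a < update.length) (hb : b < update.length) :
    ((if b < a then
          update.take b ++ PySem.List.slice update (some ((b : Int) + 1)) (some ((a : Int) + 1)) ++ update.drop a
        else update).set a (update.getD b 0)).length = update.length ∧
    ∀ j, ((if b < a then
          update.take b ++ PySem.List.slice update (some ((b : Int) + 1)) (some ((a : Int) + 1)) ++ update.drop a
        else update).set a (update.getD b 0)).getD j 0
      = if j < update.length then pvVal update a b update.length j else 0 := by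
  have hcast : ∀ k : Nat, ((k : Int) + 1) = ((k + 1 : Nat) : Int) := by intro k; push_cast; ring
  rw [hcast a, hcast b, PySem.List.slice_natCast]
  by_cases hba : b < a
  · simp only [if_pos hba]
    have hlen : (update.take b ++ (update.drop (b+1)).take (a + 1 - (b+1)) ++ update.drop a).length = update.length := by
      simp [List.length_take, List.length_drop]; omega
    refine ⟨by rw [List.length_set, hlen], ?_⟩
    intro j
    rw [pvGetD_set]
    simp only [hlen]
    have h1 : min b update.length = b := by omega
    have h2 : min (a + 1 - (b + 1)) (update.length - (b + 1)) = a + 1 - (b + 1) := by omega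
    simp only [List.getD_eq_getElem?_getD, List.getElem?_append, List.length_append,
      List.length_take, List.length_drop, List.getElem?_take, List.getElem?_drop, h1, h2]
    unfold pvVal
    split_ifs <;>
      first
        | rfl
        | omega
        | (exfalso; assumption)
        | (congr 2; omega)
        | (rw [List.getElem?_eq_none (by omega)]; rfl)
  · simp only [if_neg hba]
    refine ⟨by rw [List.length_set], ?_⟩
    intro j
    rw [pvGetD_set]
    simp only [List.getD_eq_getElem?_getD]
    unfold pvVal
    split_ifs <;>
      first
        | rfl
        | omega
        | (exfalso; assumption)
        | (congr 2; omega)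
        | (rw [List.getElem?_eq_none (by omega)]; rfl)

-- ===== VERDICT (by name: the statement is the Claim_ definition above) =====
theorem fix_rule_spec : Claim_equal_fix_rule := by
  intro update rule _dom pre
  obtain ⟨h1, h2⟩ := pre
  rw [← PySem.List.index?_isSome_iff] at h1 h2
  obtain ⟨ia, hia⟩ := Option.isSome_iff_exists.mp h1
  obtain ⟨ib, hib⟩ := Option.isSome_iff_exists.mp h2
  obtain ⟨hialt, -, -⟩ := PySem.List.getElem_of_index?_eq_some hia
  obtain ⟨hiblt, -, -⟩ := PySem.List.getElem_of_index?_eq_some hib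
  unfold Spec_fix_rule fix_rule fix_rule_alt
  rw [hia, hib]
  simp only []
  obtain ⟨hlen, hget⟩ := fixRule_loop_char update ia ib hialt hiblt update.length le_rfl
  obtain ⟨alen, aget⟩ := fixRuleAlt_char update ia ib hialt hiblt
  apply pvEq_of_getD
  · rw [hlen, alen]
  · intro j
    rw [hget j, ← aget j]
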